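-- pv_equiv track=rewrite | github.com/j-at-ch/project-euler | solutions/057.py | solution
-- ===== SOURCE A (Python) =====
-- def solution(n):
--     c = 0
--     num = 3
--     den = 2
--     for i in range(1, n):
--         num_prev = num
--         den_prev = den
--         den = den_prev + num_prev
--         num = 2 * den_prev + num_prev
--         if len(str(num)) > len(str(den)):
--             c += 1
--     return c
-- ===== SOURCE B (Python) =====
-- def _pell_tail(x0, x1, m):
--     """First m terms (starting at x1) of the Pell-type recurrence x_k = 2*x_{k-1} + x_{k-2}."""
--     out = []
--     for _ in range(m):
--         out.append(x1)
--         x0, x1 = x1, 2 * x1 + x0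
--     return out
--
--
-- def solution(n):
--     # Numerators 7, 17, 41, ... and denominators 5, 12, 29, ... of the
--     # sqrt(2) convergents both satisfy the same Pell recurrence; build the
--     # two sequences independently, then count in a separate pass.
--     m = n - 1
--     nums = _pell_tail(3, 7, m)
--     dens = _pell_tail(2, 5, m)
--     return sum(1 for a, b in zip(nums, dens) if len(str(a)) > len(str(b)))
-- ===== Notes on version B (the rewrite author's own statement) =====
-- stated objective: alternative
-- what changed: B replaces A's single loop over a coupled (numerator, denominator) fraction state by staged passes: it first materializes the numerator and denominator sequences separately (each a tail of the same Pell recurrence x_k = 2x_{k-1} + x_{k-2}, seeds (3,7) and (2,5)), then counts digit-length wins in a separate zip pass.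
import Mathlib
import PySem

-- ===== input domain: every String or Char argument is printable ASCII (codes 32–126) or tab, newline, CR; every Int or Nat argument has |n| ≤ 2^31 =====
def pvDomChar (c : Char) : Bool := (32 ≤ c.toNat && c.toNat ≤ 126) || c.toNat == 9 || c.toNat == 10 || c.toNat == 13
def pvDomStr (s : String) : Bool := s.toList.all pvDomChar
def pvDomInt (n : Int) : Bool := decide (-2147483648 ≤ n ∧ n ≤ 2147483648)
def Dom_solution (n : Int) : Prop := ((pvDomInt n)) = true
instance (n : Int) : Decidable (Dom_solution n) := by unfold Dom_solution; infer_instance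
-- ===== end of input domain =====

-- B builds the numerator and denominator Pell sequences as two separate lists and counts
-- digit-length wins in a second pass, instead of A's single loop over a coupled fraction state.

-- ===== PORT A =====
-- loop body of A: state (c, num, den)
def solStepA (s : Int × Int × Int) (_i : Int) : Int × Int × Int :=
  let c := s.1
  let num_prev := s.2.1
  let den_prev := s.2.2
  let den := den_prev + num_prev
  let num := 2 * den_prev + num_prev
  let c' := if PySem.Str.len (PySem.Int.toStr num) > PySem.Str.len (PySem.Int.toStr den) then c + 1 else c
  (c', num, den)

def solution (n : Int) : Int :=
  ((PySem.List.pyRange 1 n 1).foldl solStepA (0, 3, 2)).1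

-- ===== PORT B =====
-- _pell_tail's loop: accumulator 'out', state (x0, x1), one turn per element of range(m)
def pellTailGo (out : List Int) (x0 x1 : Int) : Nat → List Int
  | 0 => out
  | k + 1 => pellTailGo (out ++ [x1]) x1 (2 * x1 + x0) k

-- _pell_tail(x0, x1, m): range(m) has m.toNat turns
def pellTail (x0 x1 m : Int) : List Int :=
  pellTailGo [] x0 x1 m.toNat

-- counting pass: sum(1 for a, b in zip(nums, dens) if len(str(a)) > len(str(b)))
def cntStep (c : Int) (p : Int × Int) : Int :=
  if PySem.Str.len (PySem.Int.toStr p.1) > PySem.Str.len (PySem.Int.toStr p.2) then c + 1 else c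

def solution_alt (n : Int) : Int :=
  let m := n - 1
  let nums := pellTail 3 7 m
  let dens := pellTail 2 5 m
  (nums.zip dens).foldl cntStep 0

-- ===== PRECONDITION & SPEC =====
def Spec_solution (n : Int) (out : Int) : Prop := out = solution_alt n
instance (n : Int) (out : Int) : Decidable (Spec_solution n out) := by unfold Spec_solution; infer_instance

-- ===== CLAIM =====
def Claim_equal_solution : Prop := ∀ (n : Int), Dom_solution n → Spec_solution n (solution n)

-- ===== LEMMAS AND PROOFS =====

-- A's loop body ignores the range index, so its fold is an iteration counted by list length
def iterA : Nat → (Int × Int × Int) → (Int × Int × Int)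
  | 0, s => s
  | k + 1, s => iterA k (solStepA s 0)

theorem foldl_solStepA (l : List Int) : ∀ s, l.foldl solStepA s = iterA l.length s := by
  induction l with
  | nil => intro s; rfl
  | cons i l ih =>
    intro s
    simp only [List.foldl_cons, List.length_cons, iterA, ih]
    rfl

-- the cons-form of _pell_tail's output
def pellTailN (x0 x1 : Int) : Nat → List Int
  | 0 => []
  | k + 1 => x1 :: pellTailN x1 (2 * x1 + x0) k

theorem pellTailGo_eq (k : Nat) : ∀ (out : List Int) (x0 x1 : Int),
    pellTailGo out x0 x1 k = out ++ pellTailN x0 x1 k := by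
  induction k with
  | zero => intro out x0 x1; simp [pellTailGo, pellTailN]
  | succ k ih =>
    intro out x0 x1
    simp only [pellTailGo, pellTailN, ih]
    simp

-- main invariant: k turns of A's loop from (c, num, den) count exactly the zip of the two
-- Pell tails seeded from (num, den)
theorem iterA_eq_cnt (k : Nat) : ∀ (num den c : Int),
    (iterA k (c, num, den)).1 =
      ((pellTailN num (2 * den + num) k).zip (pellTailN den (den + num) k)).foldl cntStep c := by
  induction k with
  | zero => intro num den c; rfl
  | succ k ih =>
    intro num den c
    simp only [iterA, pellTailN, List.zip_cons_cons, List.foldl_cons]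
    have hstep : solStepA (c, num, den) 0 =
        (cntStep c (2 * den + num, den + num), 2 * den + num, den + num) := by
      simp [solStepA, cntStep]
    rw [hstep, ih]
    have h1 : 2 * (2 * den + num) + num = 2 * (den + num) + (2 * den + num) := by ring
    have h2 : 2 * (den + num) + den = (den + num) + (2 * den + num) := by ring
    rw [h1, h2]

theorem solution_alt_eq (n : Int) :
    solution_alt n = ((pellTail 3 7 (n - 1)).zip (pellTail 2 5 (n - 1))).foldl cntStep 0 := rfl

-- ===== VERDICT =====
theorem solution_spec : Claim_equal_solution := by
  intro n _
  unfold Spec_solution solution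
  rw [solution_alt_eq, foldl_solStepA, PySem.List.length_pyRange_one, iterA_eq_cnt]
  unfold pellTail
  rw [pellTailGo_eq, pellTailGo_eq]
  norm_num
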